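-- pv_equiv track=rewrite | github.com/angqin0799/angqin0799 | CS50P/5_unit_tests/test_plates/plates.py | sandwich_numbers
-- ===== SOURCE A (Python) =====
-- def sandwich_numbers(s):
--     ''' detects if a number comes before a letter '''
--     digit_found = False
--     then_alpha_found = False
--
--     for char in s:
--         if char.isdigit():
--             digit_found = True
--         elif char.isalpha() and digit_found:
--             then_alpha_found = True
--             break
--     return digit_found and then_alpha_found
-- ===== SOURCE B (Python) =====
-- def sandwich_numbers(s):
--     ''' detects if a number comes before a letter '''
--     digits = [i for i, c in enumerate(s) if c.isdigit()]
--     letters = [i for i, c in enumerate(s) if c.isalpha()]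
--     return bool(digits) and bool(letters) and digits[0] < letters[-1]
-- ===== Notes on version B (the rewrite author's own statement) =====
-- stated objective: alternative
-- what changed: Replaces A's single-pass two-flag state machine with staged passes: build the list of digit positions and the list of letter positions, then answer by comparing the first digit position with the last letter position.
import Mathlib
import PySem

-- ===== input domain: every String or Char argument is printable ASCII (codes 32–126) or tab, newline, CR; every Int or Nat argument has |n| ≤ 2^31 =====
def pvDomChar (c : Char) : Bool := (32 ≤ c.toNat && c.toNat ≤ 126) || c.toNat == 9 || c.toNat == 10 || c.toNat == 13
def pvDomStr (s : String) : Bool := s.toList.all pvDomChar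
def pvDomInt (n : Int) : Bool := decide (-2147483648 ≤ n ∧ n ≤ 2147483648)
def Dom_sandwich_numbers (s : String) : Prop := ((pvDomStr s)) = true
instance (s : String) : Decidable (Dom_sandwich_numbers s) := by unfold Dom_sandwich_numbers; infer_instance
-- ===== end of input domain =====

-- B replaces A's single-pass two-flag state machine with staged passes: collect digit and letter positions, then compare first digit position with last letter position (alternative decomposition; same cost).


-- ===== PORT A =====
-- loop with the two flags; the `break` makes the loop return immediately once
-- `then_alpha_found` is set (then the final `digit_found and then_alpha_found` is true)
def sandwichA_go : List Char → Bool → Bool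
  | [], _ => false  -- loop ended: then_alpha_found is false, so the result is false
  | c :: cs, digitFound =>
      if PySem.Chars.isdigit c then sandwichA_go cs true
      else if PySem.Chars.isalpha c && digitFound then true
      else sandwichA_go cs digitFound

def sandwich_numbers (s : String) : Bool := sandwichA_go s.toList false

-- ===== PORT B =====
-- the two index-list comprehensions over enumerate(s)
def idxsOf (p : Char → Bool) (l : List Char) (k : Int) : List Int :=
  (PySem.List.enumerate l k).filterMap (fun ic => if p ic.2 then some ic.1 else none)

-- 'bool(digits) and bool(letters) and digits[0] < letters[-1]' (short-circuit)
def bAux : List Int → Option Int → Bool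
  | d0 :: _, some m => decide (d0 < m)
  | _, _ => false

def sandwich_numbers_alt (s : String) : Bool :=
  bAux (idxsOf PySem.Chars.isdigit s.toList 0)
       ((idxsOf PySem.Chars.isalpha s.toList 0).getLast?)

-- ===== PRECONDITION & SPEC =====
def Spec_sandwich_numbers (s : String) (out : Bool) : Prop := out = sandwich_numbers_alt s
instance (s : String) (out : Bool) : Decidable (Spec_sandwich_numbers s out) := by unfold Spec_sandwich_numbers; infer_instance

-- ===== CLAIM (what is proved, stated in full; the proofs are below) =====
def Claim_equal_sandwich_numbers : Prop := ∀ (s : String), Dom_sandwich_numbers s → Spec_sandwich_numbers s (sandwich_numbers s)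

-- ===== LEMMAS AND PROOFS =====

-- bridge characterization: first digit, then any later letter
def sandwichMid : List Char → Bool
  | [] => false
  | c :: cs => if PySem.Chars.isdigit c then cs.any PySem.Chars.isalpha else sandwichMid cs

theorem not_alpha_of_digit (c : Char) (h : PySem.Chars.isdigit c = true) :
    PySem.Chars.isalpha c = false := by
  have h0 : '0'.val.toNat = 48 := rfl
  have h9 : '9'.val.toNat = 57 := rfl
  have hA : 'A'.val.toNat = 65 := rfl
  have hZ : 'Z'.val.toNat = 90 := rfl
  have ha : 'a'.val.toNat = 97 := rfl
  have hz : 'z'.val.toNat = 122 := rfl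
  simp only [PySem.Chars.isdigit, PySem.Chars.isalpha, PySem.Chars.isupper, PySem.Chars.islower,
    Bool.and_eq_true, decide_eq_true_eq, Char.le_def, UInt32.le_iff_toNat_le,
    Bool.or_eq_false_iff, Bool.and_eq_false_iff, decide_eq_false_iff_not, not_le] at *
  omega

-- once a digit has been seen, A's remaining loop just looks for any later letter
theorem goA_true (l : List Char) : sandwichA_go l true = l.any PySem.Chars.isalpha := by
  induction l with
  | nil => rfl
  | cons c cs ih =>
    by_cases hd : PySem.Chars.isdigit c
    · simp [sandwichA_go, hd, ih, not_alpha_of_digit c hd]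
    · by_cases ha : PySem.Chars.isalpha c
      · simp [sandwichA_go, hd, ha]
      · simp [sandwichA_go, hd, ha, ih]

theorem goA_eq_mid (l : List Char) : sandwichA_go l false = sandwichMid l := by
  induction l with
  | nil => rfl
  | cons c cs ih =>
    by_cases hd : PySem.Chars.isdigit c
    · simp [sandwichA_go, sandwichMid, hd, goA_true]
    · simp [sandwichA_go, sandwichMid, hd, ih]

theorem idxsOf_nil (p : Char → Bool) (k : Int) : idxsOf p [] k = [] := rfl

theorem idxsOf_cons (p : Char → Bool) (c : Char) (cs : List Char) (k : Int) :
    idxsOf p (c :: cs) k =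
      (if p c then [k] else []) ++ idxsOf p cs (k + 1) := by
  by_cases h : p c <;> simp [idxsOf, PySem.List.enumerate_cons, h]

theorem idxsOf_mem_ge (p : Char → Bool) (l : List Char) (k : Int) :
    ∀ x ∈ idxsOf p l k, k ≤ x := by
  induction l generalizing k with
  | nil => simp [idxsOf_nil]
  | cons c cs ih =>
    intro x hx
    rw [idxsOf_cons] at hx
    rcases List.mem_append.mp hx with h | h
    · by_cases hc : p c <;> simp [hc] at h; omega
    · have := ih (k + 1) x h; omega

theorem idxsOf_empty_iff (p : Char → Bool) (l : List Char) (k : Int) :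
    idxsOf p l k = [] ↔ l.any p = false := by
  induction l generalizing k with
  | nil => simp [idxsOf_nil]
  | cons c cs ih =>
    by_cases hc : p c
    · simp [idxsOf_cons, hc]
    · simp [idxsOf_cons, hc, ih (k + 1)]

theorem mid_false_of_no_alpha (l : List Char) (h : l.any PySem.Chars.isalpha = false) :
    sandwichMid l = false := by
  induction l with
  | nil => rfl
  | cons x xs ih =>
    simp only [List.any_cons, Bool.or_eq_false_iff] at h
    rw [sandwichMid]
    by_cases hxd : PySem.Chars.isdigit x
    · simp [hxd, h.2]
    · simp [hxd, ih h.2]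

-- the core: B's staged computation, for any start index, equals the bridge
theorem altCore_eq_mid (l : List Char) (k : Int) :
    bAux (idxsOf PySem.Chars.isdigit l k) ((idxsOf PySem.Chars.isalpha l k).getLast?)
      = sandwichMid l := by
  induction l generalizing k with
  | nil => rfl
  | cons c cs ih =>
    rw [sandwichMid, idxsOf_cons, idxsOf_cons]
    by_cases hd : PySem.Chars.isdigit c
    · -- first digit found at k; letters of the tail are all > k
      have hna := not_alpha_of_digit c hd
      simp only [hd, hna, Bool.false_eq_true, reduceIte, List.nil_append, List.singleton_append]
      rcases hL : idxsOf PySem.Chars.isalpha cs (k + 1) with _ | ⟨a, as⟩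
      · simp [bAux, (idxsOf_empty_iff _ _ _).mp hL]
      · have hne : idxsOf PySem.Chars.isalpha cs (k + 1) ≠ [] := by simp [hL]
        have hany : cs.any PySem.Chars.isalpha = true := by
          by_contra h
          exact hne ((idxsOf_empty_iff _ _ _).mpr (Bool.eq_false_iff.mpr h))
        obtain ⟨m, hm⟩ := Option.isSome_iff_exists.mp (List.getLast?_isSome.mpr hne)
        have hmge : k + 1 ≤ m :=
          idxsOf_mem_ge _ cs (k + 1) m (List.mem_of_getLast? hm)
        rw [hL] at hm
        rw [hm, hany]
        simp [bAux]
        omega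
    · by_cases ha : PySem.Chars.isalpha c
      · -- a letter at k before any digit: only the tail can still answer
        simp only [hd, ha, Bool.false_eq_true, reduceIte, List.nil_append, List.singleton_append]
        rcases hL : idxsOf PySem.Chars.isalpha cs (k + 1) with _ | ⟨a, as⟩
        · -- no letters in the tail: B gives false; bridge recurses to false
          have hanyf : cs.any PySem.Chars.isalpha = false := (idxsOf_empty_iff _ _ _).mp hL
          rw [mid_false_of_no_alpha cs hanyf]
          rcases hD : idxsOf PySem.Chars.isdigit cs (k + 1) with _ | ⟨d, ds⟩
          · rfl
          · have hdge : k + 1 ≤ d :=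
              idxsOf_mem_ge _ cs (k + 1) d (by rw [hD]; exact List.mem_cons_self ..)
            simp [bAux]
            omega
        · rw [List.getLast?_cons_cons, ← hL, ih (k + 1)]
      · simp only [hd, ha, Bool.false_eq_true, reduceIte, List.nil_append]
        exact ih (k + 1)

-- ===== VERDICT (by name: the statement is the Claim_ definition above) =====
theorem sandwich_numbers_spec : Claim_equal_sandwich_numbers := by
  intro s _
  unfold Spec_sandwich_numbers sandwich_numbers sandwich_numbers_alt
  rw [goA_eq_mid]
  exact (altCore_eq_mid s.toList 0).symm
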